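-- pv_equiv track=rewrite | github.com/Princever/DM_Prefixspan | util.py | isInSeq
-- ===== SOURCE A (Python) =====
-- def isInSeq(nseq,tseq):
--     result = []
--     cp = 0
--     np = 0
--     count = 0
--     for each in tseq:
--         count += 1
--
--     pos = 0
--     for each in nseq:
--         result.append(False)
--         pos += 1
--
--     npos = -1
--     for nbasket in nseq:
--         npos += 1
--         if np == count:
--             # print "npos:",npos,"pos:",pos
--             break
--         nbset = set(nbasket)
--         # print "nbset:",nbset
--         np = 0
--         for tbasket in tseq:
--             if np < cp:
--                 np += 1
--                 # print "np:",np,"cp:",cp,",pass"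
--                 pass
--             else:
--                 tbset = set(tbasket)
--                 # print "tbset:",tbset
--                 np += 1
--                 if tbset.issuperset(nbset):
--                     # print "find:nbset:",nbset,"tbset:",tbset
--                     result[npos] = True
--                     cp = np
--                     # print "np:",np,"cp:",cp
--                     break
--                 else:
--                     result[npos] = False
--                     # print "np:",np,"count:",count
--
--     outcome = True
--     for each in result:
--         outcome &= each
--     return outcome
-- ===== SOURCE B (Python) =====
-- def isInSeq(nseq, tseq):
--     # Two-pointer greedy match: one shared iterator over tseq, consumed across baskets.
--     it = iter(tseq)
--     for nbasket in nseq: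
--         need = set(nbasket)
--         for tbasket in it:
--             if need.issubset(tbasket):
--                 break
--         else:
--             return False
--     return True
-- ===== Notes on version B (the rewrite author's own statement) =====
-- stated objective: faster
-- what changed: Replaced A's counters, pre-built result list and inner rescan of tseq from index 0 (skipping np<cp elements each time) by a single shared iterator over tseq consumed greedily across the baskets of nseq, returning False as soon as a basket finds no superset.
import Mathlib
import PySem

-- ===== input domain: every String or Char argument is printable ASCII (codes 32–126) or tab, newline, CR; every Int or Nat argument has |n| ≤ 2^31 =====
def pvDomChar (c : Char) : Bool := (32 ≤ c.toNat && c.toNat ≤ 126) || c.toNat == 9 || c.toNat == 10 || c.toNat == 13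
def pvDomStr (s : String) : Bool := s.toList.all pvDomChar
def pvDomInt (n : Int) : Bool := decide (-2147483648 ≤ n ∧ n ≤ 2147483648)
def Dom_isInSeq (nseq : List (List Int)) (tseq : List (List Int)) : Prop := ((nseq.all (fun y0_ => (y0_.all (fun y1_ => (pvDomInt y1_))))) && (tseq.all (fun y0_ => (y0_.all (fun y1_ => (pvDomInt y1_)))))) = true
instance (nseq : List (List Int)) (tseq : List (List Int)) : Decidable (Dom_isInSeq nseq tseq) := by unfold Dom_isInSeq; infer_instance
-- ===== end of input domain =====

-- B replaces A's counters and repeated rescans of tseq by one shared greedy pass (objective: faster).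

-- ===== PORT A =====
-- inner 'for tbasket in tseq' loop: returns (result, cp, np) after the loop/break
def pvInnerA (nbset : PySem.Set Int) (tseq : List (List Int)) (cp np : Int)
    (result : List Bool) (npos : Int) : List Bool × Int × Int :=
  match tseq with
  | [] => (result, cp, np)
  | tbasket :: rest =>
    if np < cp then
      pvInnerA nbset rest cp (np + 1) result npos
    else
      let tbset := PySem.Set.ofList tbasket
      let np' := np + 1
      if PySem.Set.issuperset tbset nbset then
        (PySem.List.pySetD result npos true, np', np')   -- result[npos] = True; cp = np; break
      else
        pvInnerA nbset rest cp np' (PySem.List.pySetD result npos false) npos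

-- outer 'for nbasket in nseq' loop with its break
def pvOuterA (tseq : List (List Int)) (count : Int) : List (List Int) → List Bool → Int → Int → Int → List Bool
  | [], result, _, _, _ => result
  | nbasket :: rest, result, cp, np, npos =>
    let npos' := npos + 1
    if np == count then result                            -- break
    else
      let nbset := PySem.Set.ofList nbasket
      match pvInnerA nbset tseq cp 0 result npos' with    -- np = 0 then the inner loop
      | (result', cp', np') => pvOuterA tseq count rest result' cp' np' npos'

def isInSeq (nseq : List (List Int)) (tseq : List (List Int)) : Bool :=
  let count : Int := tseq.foldl (fun c _ => c + 1) 0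
  let result : List Bool := nseq.foldl (fun r _ => r ++ [false]) []
  let result := pvOuterA tseq count nseq result 0 0 (-1)
  result.foldl (fun b x => b && x) true

-- ===== PORT B =====
-- inner 'for tbasket in it' loop: the unconsumed remainder of the iterator, or none if exhausted
def pvFindB (need : PySem.Set Int) : List (List Int) → Option (List (List Int))
  | [] => none
  | tbasket :: rest =>
    if PySem.Set.issubset need tbasket then some rest else pvFindB need rest

def pvGoB : List (List Int) → List (List Int) → Bool
  | [], _ => true
  | nbasket :: rest, ts =>
    match pvFindB (PySem.Set.ofList nbasket) ts with
    | some ts' => pvGoB rest ts'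
    | none => false

def isInSeq_alt (nseq : List (List Int)) (tseq : List (List Int)) : Bool :=
  pvGoB nseq tseq

-- ===== PRECONDITION & SPEC =====
def Spec_isInSeq (nseq : List (List Int)) (tseq : List (List Int)) (out : Bool) : Prop := out = isInSeq_alt nseq tseq
instance (nseq : List (List Int)) (tseq : List (List Int)) (out : Bool) : Decidable (Spec_isInSeq nseq tseq out) := by unfold Spec_isInSeq; infer_instance

-- ===== CLAIM (what is proved, stated in full; the proofs are below) =====
def Claim_equal_isInSeq : Prop := ∀ (nseq : List (List Int)) (tseq : List (List Int)), Dom_isInSeq nseq tseq → Spec_isInSeq nseq tseq (isInSeq nseq tseq)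

-- ===== LEMMAS AND PROOFS =====

theorem pv_count_eq (ts : List (List Int)) (a : Int) :
    ts.foldl (fun c _ => c + 1) a = a + ts.length := by
  induction ts generalizing a with
  | nil => simp
  | cons h t ih => simp [List.foldl, ih]; omega

theorem pv_init_eq (ns : List (List Int)) (acc : List Bool) :
    ns.foldl (fun r _ => r ++ [false]) acc = acc ++ List.replicate ns.length false := by
  induction ns generalizing acc with
  | nil => simp
  | cons h t ih => simp [List.foldl, ih, List.replicate_succ]

theorem pv_foldl_and (l : List Bool) (b : Bool) :
    l.foldl (fun x y => x && y) b = (b && l.all id) := by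
  induction l generalizing b with
  | nil => simp
  | cons h t ih => simp [List.foldl, ih, Bool.and_assoc]

theorem pv_set_mid (pre post : List Bool) (b v : Bool) :
    (pre ++ b :: post).set pre.length v = pre ++ v :: post := by
  induction pre with
  | nil => simp
  | cons h t ih => simp [ih]

theorem pv_super_eq_sub (tb : List Int) (s : PySem.Set Int) :
    PySem.Set.issuperset (PySem.Set.ofList tb) s = PySem.Set.issubset s tb := by
  rcases h1 : PySem.Set.issuperset (PySem.Set.ofList tb) s
  · rcases h2 : PySem.Set.issubset s tb
    · rfl
    · exfalso
      rw [PySem.Set.issubset_iff] at h2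
      have := (PySem.Set.issuperset_iff (PySem.Set.ofList tb) s).mpr
        (fun x hx => (PySem.Set.mem_ofList tb x).mpr (h2 x hx))
      simp [h1] at this
  · rw [PySem.Set.issuperset_iff] at h1
    symm
    rw [PySem.Set.issubset_iff]
    intro x hx
    exact (PySem.Set.mem_ofList tb x).mp (h1 x hx)

-- skip phase: the first (cp - np) elements of tseq are skipped
theorem pv_inner_skip (s : PySem.Set Int) (k : Nat) :
    ∀ (ts : List (List Int)) (cp np : Int) (res : List Bool) (npos : Int),
    np + k = cp → k ≤ ts.length →
    pvInnerA s ts cp np res npos = pvInnerA s (ts.drop k) cp cp res npos := by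
  induction k with
  | zero => intro ts cp np res npos h _; simp at h; simp [h]
  | succ k ih =>
    intro ts cp np res npos h hl
    cases ts with
    | nil => simp at hl
    | cons tb rest =>
      have hlt : np < cp := by omega
      rw [pvInnerA]
      simp only [hlt, if_true]
      rw [ih rest cp (np + 1) res npos (by omega) (by simpa using hl)]
      simp

-- scan phase, no superset found: result unchanged, np advanced past the end
theorem pv_inner_none (s : PySem.Set Int) :
    ∀ (ts : List (List Int)) (cp np : Int) (pre post : List Bool),
    cp ≤ np → pvFindB s ts = none →
    pvInnerA s ts cp np (pre ++ false :: post) (pre.length : Int) =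
      (pre ++ false :: post, cp, np + ts.length) := by
  intro ts
  induction ts with
  | nil => intro cp np pre post _ _; simp [pvInnerA]
  | cons tb rest ih =>
    intro cp np pre post hle hf
    rw [pvFindB] at hf
    rw [pvInnerA]
    have hnl : ¬ np < cp := by omega
    simp only [hnl, if_false]
    rcases hsub : PySem.Set.issubset s tb with _ | _
    · simp only [hsub] at hf
      rw [pv_super_eq_sub, hsub]
      simp only [if_false, Bool.false_eq_true]
      rw [PySem.List.pySetD_natCast, pv_set_mid]
      rw [ih cp (np + 1) pre post (by omega) hf]
      simp; omega
    · simp [hsub] at hf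

theorem pv_find_le (s : PySem.Set Int) :
    ∀ (ts ts' : List (List Int)), pvFindB s ts = some ts' → ts'.length ≤ ts.length ∧ ts.drop (ts.length - ts'.length) = ts' := by
  intro ts
  induction ts with
  | nil => intro ts' hf; simp [pvFindB] at hf
  | cons tb rest ih =>
    intro ts' hf
    rw [pvFindB] at hf
    rcases hsub : PySem.Set.issubset s tb with _ | _
    · simp only [hsub] at hf
      obtain ⟨h1, h2⟩ := ih ts' hf
      constructor
      · simp; omega
      · have : (tb :: rest).length - ts'.length = (rest.length - ts'.length) + 1 := by simp; omega
        rw [this]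
        simpa using h2
    · simp only [hsub, if_true, Option.some.injEq] at hf
      subst hf
      constructor
      · simp
      · simp

-- scan phase, superset found: result[npos] = true, cp = np' = position after the match
theorem pv_inner_some (s : PySem.Set Int) :
    ∀ (ts ts' : List (List Int)) (cp np : Int) (pre post : List Bool),
    cp ≤ np → pvFindB s ts = some ts' →
    pvInnerA s ts cp np (pre ++ false :: post) (pre.length : Int) =
      (pre ++ true :: post, np + (ts.length - ts'.length : Int), np + (ts.length - ts'.length : Int)) := by
  intro ts
  induction ts with
  | nil => intro ts' cp np pre post _ hf; simp [pvFindB] at hf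
  | cons tb rest ih =>
    intro ts' cp np pre post hle hf
    rw [pvFindB] at hf
    rw [pvInnerA]
    have hnl : ¬ np < cp := by omega
    simp only [hnl, if_false]
    rcases hsub : PySem.Set.issubset s tb with _ | _
    · simp only [hsub] at hf
      rw [pv_super_eq_sub, hsub]
      simp only [if_false, Bool.false_eq_true]
      rw [PySem.List.pySetD_natCast, pv_set_mid]
      rw [ih ts' cp (np + 1) pre post (by omega) hf]
      have hlen : ts'.length ≤ rest.length := (pv_find_le s rest ts' hf).1
      have hnum : np + 1 + ((rest.length : Int) - (ts'.length : Int))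
          = np + (((tb :: rest).length : Int) - (ts'.length : Int)) := by
        simp only [List.length_cons]; push_cast; omega
      rw [hnum]
    · simp only [hsub, if_true, Option.some.injEq] at hf
      rw [pv_super_eq_sub, hsub]
      simp only [if_true]
      rw [PySem.List.pySetD_natCast, pv_set_mid]
      subst hf
      have hnum : np + 1 = np + (((tb :: rest).length : Int) - (rest.length : Int)) := by
        simp only [List.length_cons]; push_cast; omega
      rw [hnum]

theorem pv_main (tseq : List (List Int)) :
    ∀ (ns : List (List Int)) (c : Nat) (pre : List Bool),
    c ≤ tseq.length → (∀ x ∈ pre, x = true) →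
    (pvOuterA tseq (tseq.length : Int) ns (pre ++ List.replicate ns.length false)
        (c : Int) (c : Int) ((pre.length : Int) - 1)).foldl (fun x y => x && y) true
      = pvGoB ns (tseq.drop c) := by
  intro ns
  induction ns with
  | nil =>
    intro c pre _ hpre
    rw [pvOuterA, pvGoB]
    simp only [List.length_nil, List.replicate_zero, List.append_nil]
    rw [pv_foldl_and]
    simp only [Bool.true_and, List.all_eq_true, id]
    exact hpre
  | cons nb rest ih =>
    intro c pre hc hpre
    have hfalse : ∀ (post : List Bool),
        (pre ++ false :: post).foldl (fun x y => x && y) true = false := by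
      intro post; simp [pv_foldl_and]
    rw [pvOuterA]
    have hnpos : ((pre.length : Int) - 1 + 1) = (pre.length : Int) := by omega
    by_cases hce : c = tseq.length
    · subst hce
      simp only [beq_self_eq_true, if_true, List.length_cons]
      rw [List.replicate_succ]
      rw [List.drop_length, pvGoB, pvFindB]
      exact hfalse _
    · have hb : (((c : Int)) == ((tseq.length : Int))) = false :=
        beq_eq_false_iff_ne.mpr (by exact_mod_cast hce)
      simp only [hb, Bool.false_eq_true, if_false, hnpos, List.length_cons]
      rw [List.replicate_succ]
      have hskip := pv_inner_skip (PySem.Set.ofList nb) c tseq (c : Int) 0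
        (pre ++ false :: List.replicate rest.length false) (pre.length : Int)
        (by omega) hc
      rw [hskip]
      rcases hf : pvFindB (PySem.Set.ofList nb) (tseq.drop c) with _ | ts'
      · rw [pv_inner_none (PySem.Set.ofList nb) (tseq.drop c) (c : Int) (c : Int)
          pre (List.replicate rest.length false) le_rfl hf]
        dsimp only
        have hnp : ((c : Int) + ((tseq.drop c).length : Int)) = (tseq.length : Int) := by
          simp [List.length_drop]; omega
        rw [hnp]
        have : pvOuterA tseq (tseq.length : Int) rest
            (pre ++ false :: List.replicate rest.length false)
            (c : Int) (tseq.length : Int) (pre.length : Int)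
            = pre ++ false :: List.replicate rest.length false := by
          cases rest with
          | nil => rw [pvOuterA]
          | cons nb2 r2 => rw [pvOuterA]; simp
        rw [this, pvGoB, hf]
        exact hfalse _
      · obtain ⟨hlen, hdrop⟩ := pv_find_le (PySem.Set.ofList nb) (tseq.drop c) ts' hf
        rw [pv_inner_some (PySem.Set.ofList nb) (tseq.drop c) ts' (c : Int) (c : Int)
          pre (List.replicate rest.length false) le_rfl hf]
        dsimp only
        set c2 : Nat := c + ((tseq.drop c).length - ts'.length) with hc2
        have hcast : ((c : Int) + (((tseq.drop c).length : Int) - (ts'.length : Int))) = (c2 : Int) := by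
          rw [hc2]; push_cast [hlen]; omega
        rw [hcast]
        have hc2le : c2 ≤ tseq.length := by
          have hld : (List.drop c tseq).length = tseq.length - c := List.length_drop
          omega
        have hdrop2 : tseq.drop c2 = ts' := by
          rw [List.drop_drop] at hdrop
          rw [hc2]
          exact hdrop
        have hpre' : ∀ x ∈ pre ++ [true], x = true := by
          intro x hx
          rcases List.mem_append.mp hx with h | h
          · exact hpre x h
          · simpa using h
        have hlenpre : ((pre ++ [true]).length : Int) - 1 = (pre.length : Int) := by
          simp
        have hres : pre ++ true :: List.replicate rest.length false
            = (pre ++ [true]) ++ List.replicate rest.length false := by simp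
        rw [hres]
        have := ih c2 (pre ++ [true]) hc2le hpre'
        rw [hlenpre] at this
        rw [this, hdrop2, pvGoB, hf]

-- ===== VERDICT (by name: the statement is the Claim_ definition above) =====
theorem isInSeq_spec : Claim_equal_isInSeq := by
  intro nseq tseq _
  unfold Spec_isInSeq isInSeq isInSeq_alt
  rw [pv_count_eq tseq 0, pv_init_eq nseq []]
  have := pv_main tseq nseq 0 [] (by omega) (by simp)
  simpa using this
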